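-- pv_equiv track=rewrite | github.com/KevynUtopia/FUSR | baselines/pseudo.py | comp_strides
-- ===== SOURCE A (Python) =====
-- def comp_strides(scale_factor, n_layers):
--     strides = [1 for _ in range(n_layers)]
--     assert scale_factor in [1, 2, 4]
--     n_down = 0
--     while True:
--         scale_factor = scale_factor // 2
--         if scale_factor <= 0:
--             break
--         n_down += 1
--     for s in range(n_down):
--         strides[s] = 2
--     return strides, n_down
-- ===== SOURCE B (Python) =====
-- def comp_strides(scale_factor, n_layers):
--     assert scale_factor in [1, 2, 4]
--     n_down = scale_factor.bit_length() - 1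
--     strides = [2 if i < n_down else 1 for i in range(n_layers)]
--     return strides, n_down
-- ===== Notes on version B (the rewrite author's own statement) =====
-- stated objective: simpler
-- what changed: B replaces A's repeated-halving while-loop with the closed form bit_length()-1 and builds the stride list in a single comprehension instead of building all ones and then mutating a prefix in place.
import Mathlib
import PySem

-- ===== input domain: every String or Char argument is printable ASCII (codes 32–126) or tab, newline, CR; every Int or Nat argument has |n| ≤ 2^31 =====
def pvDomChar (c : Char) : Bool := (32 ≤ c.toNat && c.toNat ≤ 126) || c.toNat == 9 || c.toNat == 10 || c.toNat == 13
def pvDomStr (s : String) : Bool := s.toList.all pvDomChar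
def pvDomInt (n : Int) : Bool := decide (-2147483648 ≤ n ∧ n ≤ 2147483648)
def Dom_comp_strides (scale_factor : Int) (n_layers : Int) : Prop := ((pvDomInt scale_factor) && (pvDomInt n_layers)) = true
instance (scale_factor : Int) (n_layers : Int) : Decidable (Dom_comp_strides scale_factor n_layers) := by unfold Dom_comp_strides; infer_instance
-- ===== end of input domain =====

-- B computes n_down by the closed form bit_length-1 and builds the stride list in one
-- comprehension instead of A's halving loop plus in-place prefix mutation (objective: simpler).

-- ===== PORT A =====
-- the 'while True: scale_factor //= 2 …' loop; fuel makes the recursion total, it is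
-- ample on every input the claim covers (scale_factor ∈ {1,2,4})
def compStridesHalve (fuel : Nat) (s n : Int) : Int :=
  match fuel with
  | 0 => n
  | fuel + 1 =>
    let s' := PySem.Int.floordiv s 2
    if s' ≤ 0 then n else compStridesHalve fuel s' (n + 1)

def comp_strides (scale_factor : Int) (n_layers : Int) : List Int × Int :=
  let strides : List Int := (PySem.List.pyRange 0 n_layers 1).map (fun _ => 1)
  -- assert scale_factor in [1, 2, 4]  (AssertionError outside → Pre_)
  let n_down : Int := compStridesHalve (scale_factor.natAbs + 1) scale_factor 0
  -- for s in range(n_down): strides[s] = 2  (IndexError when n_down > len → Pre_)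
  let strides := (PySem.List.pyRange 0 n_down 1).foldl (fun acc s => acc.set s.toNat 2) strides
  (strides, n_down)

-- ===== PORT B =====
-- Python int.bit_length (exact: number of bits of |n|)
def compStridesBitLength (n : Int) : Int :=
  if n = 0 then 0 else Int.ofNat (n.natAbs.log2 + 1)

def comp_strides_alt (scale_factor : Int) (n_layers : Int) : List Int × Int :=
  -- assert scale_factor in [1, 2, 4]  (AssertionError outside → Pre_)
  let n_down : Int := compStridesBitLength scale_factor - 1
  let strides : List Int := (PySem.List.pyRange 0 n_layers 1).map (fun i => if i < n_down then 2 else 1)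
  (strides, n_down)

-- ===== PRECONDITION & SPEC =====
-- Pre_ excludes the inputs where Python A raises: AssertionError unless scale_factor ∈ {1,2,4},
-- and IndexError in 'strides[s] = 2' when n_down exceeds n_layers.
def Pre_comp_strides (scale_factor : Int) (n_layers : Int) : Prop :=
  scale_factor = 1 ∨ (scale_factor = 2 ∧ 1 ≤ n_layers) ∨ (scale_factor = 4 ∧ 2 ≤ n_layers)
instance (scale_factor : Int) (n_layers : Int) : Decidable (Pre_comp_strides scale_factor n_layers) := by
  unfold Pre_comp_strides; infer_instance

def pvWitness_comp_strides : Int × Int := (4, 3)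

def Spec_comp_strides (scale_factor : Int) (n_layers : Int) (out : List Int × Int) : Prop := out = comp_strides_alt scale_factor n_layers
instance (scale_factor : Int) (n_layers : Int) (out : List Int × Int) : Decidable (Spec_comp_strides scale_factor n_layers out) := by unfold Spec_comp_strides; infer_instance

-- ===== CLAIM (what is proved, stated in full; the proofs are below) =====
def Claim_equal_comp_strides : Prop := ∀ (scale_factor : Int) (n_layers : Int), Dom_comp_strides scale_factor n_layers → Pre_comp_strides scale_factor n_layers → Spec_comp_strides scale_factor n_layers (comp_strides scale_factor n_layers)

-- ===== LEMMAS AND PROOFS =====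

-- a range starting at or beyond d maps to all ones under B's comprehension body
theorem map_ite_ones (d a n : Int) (h : d ≤ a) :
    (PySem.List.pyRange a n 1).map (fun i => if i < d then (2:Int) else 1)
      = (PySem.List.pyRange a n 1).map (fun _ => 1) := by
  apply List.map_congr_left
  intro x hx
  have hx' := (PySem.List.mem_pyRange_one).1 hx
  simp only [if_neg (by omega : ¬ x < d)]

-- A's prefix-mutation loop over range(k) equals B's comprehension, for k ≤ n
theorem foldl_set_prefix (k : ℕ) (n : Int) (hn : (k:Int) ≤ n) :
    (PySem.List.pyRange 0 (k:Int) 1).foldl (fun acc s => acc.set s.toNat 2)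
        ((PySem.List.pyRange 0 n 1).map (fun _ => (1:Int)))
      = (PySem.List.pyRange 0 n 1).map (fun i => if i < (k:Int) then 2 else 1) := by
  induction k with
  | zero =>
    rw [PySem.List.pyRange_one_eq_nil (a := 0) (b := ((0:ℕ):Int)) (by norm_num),
        List.foldl_nil, show ((0:ℕ):Int) = 0 from rfl, map_ite_ones 0 0 n le_rfl]
  | succ k ih =>
    have hk : (k:Int) ≤ n := by push_cast at hn ⊢; omega
    have hsplit : PySem.List.pyRange 0 ((k+1 : ℕ):Int) 1
        = PySem.List.pyRange 0 (k:Int) 1 ++ [(k:Int)] := by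
      push_cast
      exact PySem.List.pyRange_one_succ_right (by positivity)
    rw [hsplit, List.foldl_append, ih hk, List.foldl_cons, List.foldl_nil]
    apply List.ext_getElem
    · simp
    · intro j h1 h2
      have hj : j < n.toNat := by
        simpa [PySem.List.length_pyRange_one] using h2
      have hkn : k < n.toNat := by push_cast at hn; omega
      rw [List.getElem_set]
      simp only [List.getElem_map, PySem.List.getElem_pyRange_one]
      have : ((k:Int)).toNat = k := by simp
      rw [this]
      by_cases hjk : k = j
      · subst hjk; simp
      · rw [if_neg hjk]
        push_cast
        have : ¬ ((0:Int) + j = k) := by omega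
        by_cases h : (0:Int) + (j:Int) < (k:Int) <;> simp_all <;> omega

theorem comp_strides_spec : Claim_equal_comp_strides := by
  intro s n _ hpre
  unfold Spec_comp_strides
  rcases hpre with h | ⟨h, hn⟩ | ⟨h, hn⟩
  · subst h
    have hd : compStridesHalve (Int.natAbs 1 + 1) 1 0 = 0 := by decide
    have hb : compStridesBitLength 1 - 1 = 0 := by decide
    simp only [comp_strides, comp_strides_alt, hd, hb, Prod.mk.injEq, and_true]
    rw [PySem.List.pyRange_one_eq_nil (a := 0) (b := (0:Int)) le_rfl, List.foldl_nil,
        map_ite_ones 0 0 n le_rfl]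
  · subst h
    have hd : compStridesHalve (Int.natAbs 2 + 1) 2 0 = 1 := by decide
    have hb : compStridesBitLength 2 - 1 = 1 := by decide
    simp only [comp_strides, comp_strides_alt, hd, hb, Prod.mk.injEq, and_true]
    have := foldl_set_prefix 1 n (by exact_mod_cast hn)
    simpa using this
  · subst h
    have hd : compStridesHalve (Int.natAbs 4 + 1) 4 0 = 2 := by decide
    have hb : compStridesBitLength 4 - 1 = 2 := by decide
    simp only [comp_strides, comp_strides_alt, hd, hb, Prod.mk.injEq, and_true]
    have := foldl_set_prefix 2 n (by exact_mod_cast hn)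
    simpa using this

-- ===== VERDICT (by name: the statement is the Claim_ definition above) =====
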